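-- pv_equiv track=rewrite | github.com/moshe-kahn/listen-labs | backend/app/main.py | _album_track_name_map
-- ===== SOURCE A (Python) =====
-- from typing import Any, Callable
--
-- def _album_track_name_map(tracks: list[dict[str, Any]]) -> dict[str, list[str]]:
--     names_by_album: dict[str, list[str]] = {}
--     for track in tracks:
--         album_id = track.get("album_id")
--         track_name = track.get("track_name")
--         if not album_id or not track_name:
--             continue
--         album_names = names_by_album.setdefault(album_id, [])
--         if track_name not in album_names:
--             album_names.append(track_name)
--     return names_by_album
-- ===== SOURCE B (Python) =====
-- def _album_track_name_map(tracks):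
--     pairs = []
--     for track in tracks:
--         album_id = track.get("album_id")
--         track_name = track.get("track_name")
--         if not album_id or not track_name:
--             continue
--         pairs.append((album_id, track_name))
--     albums = list(dict.fromkeys(a for a, _ in pairs))
--     return {a: list(dict.fromkeys(n for p, n in pairs if p == a)) for a in albums}
-- ===== Notes on version B (the rewrite author's own statement) =====
-- stated objective: alternative
-- what changed: A builds the result dict incrementally with an inline membership-test dedup per track; B never touches a dict while scanning: it collects all valid (album, name) pairs into a flat list, then constructs the result from the deduped album list, filtering the pair list per album and deduplicating with dict.fromkeys.
import Mathlib
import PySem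

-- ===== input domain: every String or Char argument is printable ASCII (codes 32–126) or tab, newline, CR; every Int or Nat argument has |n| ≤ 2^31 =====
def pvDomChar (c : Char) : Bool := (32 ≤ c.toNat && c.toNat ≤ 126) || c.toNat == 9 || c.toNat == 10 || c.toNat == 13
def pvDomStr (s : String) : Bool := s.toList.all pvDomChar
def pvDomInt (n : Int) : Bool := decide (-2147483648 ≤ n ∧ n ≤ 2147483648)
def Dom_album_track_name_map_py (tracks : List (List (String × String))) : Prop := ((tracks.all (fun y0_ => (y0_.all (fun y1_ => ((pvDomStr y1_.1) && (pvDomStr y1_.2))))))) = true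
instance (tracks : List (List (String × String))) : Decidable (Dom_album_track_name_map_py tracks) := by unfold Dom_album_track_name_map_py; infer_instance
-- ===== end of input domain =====

-- B flattens the valid tracks to a pair list first and builds each album's deduped name
-- list by filtering that flat list, instead of A's incremental dict with inline dedup;
-- return values are equal.

-- shared helper: Python's track.get(k) on an association-list dict (first match)
def pvDictGet (track : List (String × String)) (k : String) : Option String :=
  match track with
  | [] => none
  | (k', v) :: rest => if k' = k then some v else pvDictGet rest k

-- ===== PORT A =====
-- loop body of A: setdefault + membership test + conditional append = modify with default []
def pvStepA (d : PySem.Dict String (List String)) (track : List (String × String)) :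
    PySem.Dict String (List String) :=
  match pvDictGet track "album_id", pvDictGet track "track_name" with
  | some a, some n =>
    if a = "" ∨ n = "" then d
    else d.modify a [] (fun ns => if n ∈ ns then ns else ns ++ [n])
  | _, _ => d

def album_track_name_map_py (tracks : List (List (String × String))) : List (String × List String) :=
  (tracks.foldl pvStepA PySem.Dict.empty).items

-- ===== PORT B =====
-- pass 1 of B: collect the valid (album_id, track_name) pairs into a flat list
def pvPairs (tracks : List (List (String × String))) : List (String × String) :=
  tracks.foldl (fun acc track =>
    match pvDictGet track "album_id", pvDictGet track "track_name" with
    | some a, some n => if a = "" ∨ n = "" then acc else acc ++ [(a, n)]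
    | _, _ => acc) []

-- pass 2 of B: deduped album list, then per album filter the pairs and dedup the names
def album_track_name_map_py_alt (tracks : List (List (String × String))) : List (String × List String) :=
  let ps := pvPairs tracks
  (PySem.List.dedup (ps.map Prod.fst)).map
    (fun a => (a, PySem.List.dedup ((ps.filter (fun p => p.1 = a)).map Prod.snd)))

-- ===== PRECONDITION & SPEC =====
def Spec_album_track_name_map_py (tracks : List (List (String × String))) (out : List (String × List String)) : Prop := out = album_track_name_map_py_alt tracks
instance (tracks : List (List (String × String))) (out : List (String × List String)) : Decidable (Spec_album_track_name_map_py tracks out) := by unfold Spec_album_track_name_map_py; infer_instance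

-- ===== CLAIM =====
def Claim_equal_album_track_name_map_py : Prop := ∀ (tracks : List (List (String × String))), Dom_album_track_name_map_py tracks → Spec_album_track_name_map_py tracks (album_track_name_map_py tracks)

-- ===== LEMMAS AND PROOFS =====

-- the recursive form of the pair extraction, convenient for induction
def pvPairsRec : List (List (String × String)) → List (String × String)
  | [] => []
  | t :: ts =>
    match pvDictGet t "album_id", pvDictGet t "track_name" with
    | some a, some n =>
      if a = "" ∨ n = "" then pvPairsRec ts else (a, n) :: pvPairsRec ts
    | _, _ => pvPairsRec ts

-- A's step, re-expressed on an already-extracted pair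
def pvStepP (d : PySem.Dict String (List String)) (p : String × String) :
    PySem.Dict String (List String) :=
  d.modify p.1 [] (fun ns => if p.2 ∈ ns then ns else ns ++ [p.2])

lemma pvPairs_eq_rec (tracks : List (List (String × String))) :
    pvPairs tracks = pvPairsRec tracks := by
  suffices h : ∀ acc, tracks.foldl (fun acc track =>
      match pvDictGet track "album_id", pvDictGet track "track_name" with
      | some a, some n => if a = "" ∨ n = "" then acc else acc ++ [(a, n)]
      | _, _ => acc) acc = acc ++ pvPairsRec tracks by
    simpa using h []
  induction tracks with
  | nil => intro acc; simp [pvPairsRec]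
  | cons t ts ih =>
    intro acc
    simp only [List.foldl_cons, pvPairsRec]
    cases pvDictGet t "album_id" with
    | none => exact ih acc
    | some a =>
      cases pvDictGet t "track_name" with
      | none => exact ih acc
      | some n =>
        by_cases hg : a = "" ∨ n = ""
        · simp only [hg, if_true]; exact ih acc
        · simp only [hg, if_false, ih]; simp

lemma foldA_eq_foldP (tracks : List (List (String × String))) :
    ∀ d, tracks.foldl pvStepA d = (pvPairsRec tracks).foldl pvStepP d := by
  induction tracks with
  | nil => intro d; rfl
  | cons t ts ih =>
    intro d
    simp only [List.foldl_cons, pvPairsRec, pvStepA]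
    cases pvDictGet t "album_id" with
    | none => exact ih d
    | some a =>
      cases pvDictGet t "track_name" with
      | none => exact ih d
      | some n =>
        by_cases hg : a = "" ∨ n = ""
        · simp only [hg, if_true]; exact ih d
        · simp only [hg, if_false, List.foldl_cons]; exact ih _

lemma getD_foldP (ps : List (String × String)) :
    ∀ (d : PySem.Dict String (List String)) (a : String),
      (ps.foldl pvStepP d).getD a [] =
      (ps.filter (fun p => p.1 = a)).foldl
        (fun ns p => if p.2 ∈ ns then ns else ns ++ [p.2]) (d.getD a []) := by
  induction ps with
  | nil => intro d a; rfl
  | cons p ps ih =>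
    intro d a
    simp only [List.foldl_cons, List.filter_cons]
    by_cases hp : p.1 = a
    · simp only [hp, decide_true, if_true, List.foldl_cons, ih]
      congr 1
      simp [pvStepP, hp]
    · simp only [hp, decide_false, ih]
      congr 1
      simp [pvStepP, PySem.Dict.getD_modify, Ne.symm hp]

-- ===== VERDICT =====
theorem album_track_name_map_py_spec : Claim_equal_album_track_name_map_py := by
  intro tracks _
  unfold Spec_album_track_name_map_py album_track_name_map_py album_track_name_map_py_alt
  rw [pvPairs_eq_rec, foldA_eq_foldP]
  set ps := pvPairsRec tracks with hps
  have hkeys : ((ps.foldl pvStepP PySem.Dict.empty)).keys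
      = PySem.Set.ofList (ps.map Prod.fst) := by
    have := PySem.Dict.keys_foldl_modify_key (l := ps) (key := Prod.fst)
      (d0 := ([] : List String))
      (f := fun _ p => fun ns => if p.2 ∈ ns then ns else ns ++ [p.2])
      (d := PySem.Dict.empty)
    simpa [pvStepP, PySem.Dict.keys_empty, PySem.Set.update_nil_left] using this
  have hnd : ((ps.foldl pvStepP PySem.Dict.empty)).keys.Nodup := by
    rw [hkeys]; exact PySem.Set.nodup_ofList _
  rw [PySem.Dict.items_eq_map_keys _ hnd ([] : List String), hkeys]
  simp only [PySem.List.dedup_eq_ofList]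
  apply List.map_congr_left
  intro a _
  refine Prod.ext rfl ?_
  simp only [getD_foldP, PySem.Dict.getD_empty]
  have h2 : PySem.Set.ofList ((ps.filter (fun p => decide (p.1 = a))).map Prod.snd)
      = (ps.filter (fun p => decide (p.1 = a))).foldl
          (fun s p => PySem.Set.add s p.2) [] := by
    rw [← PySem.Set.update_nil_left, PySem.Set.update_map_eq_foldl_add]
  rw [h2]
  simp only [PySem.Set.add_eq_ite]
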